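-- pv_equiv track=rewrite | github.com/PacomeKFP/Python | Annagrames/anagram.py | autre
-- ===== SOURCE A (Python) =====
-- def autre(Liste, chaine, long):
--     result = []
--     if(long == 0):
--         return result
--     for line in Liste:
--         ok = True
--         if len(line) == long:
--             for letter in line:
--                 if line.count(letter) > chaine.count(letter):
--                     ok=False
--                     break
--         else:
--             ok= False
--         if ok:
--             result.append(line)
--     return result + autre(Liste, chaine, long-1)
-- ===== SOURCE B (Python) =====
-- def autre(Liste, chaine, long):
--     cnt = {}
--     for c in chaine:
--         cnt[c] = cnt.get(c, 0) + 1
--     buckets = {}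
--     for line in Liste:
--         lc = {}
--         for c in line:
--             lc[c] = lc.get(c, 0) + 1
--         if all(v <= cnt.get(c, 0) for c, v in lc.items()):
--             buckets.setdefault(len(line), []).append(line)
--     out = []
--     for k in range(long, 0, -1):
--         out += buckets.get(k, [])
--     return out
-- ===== Notes on version B (the rewrite author's own statement) =====
-- stated objective: faster
-- what changed: B precomputes character counts of chaine once, makes a single pass over Liste bucketing the sub-anagram words by length (per-line counter instead of quadratic str.count calls), then concatenates buckets for k = long..1, instead of A's recursion that rescans the whole list with quadratic per-line count checks at every length level.
import Mathlib
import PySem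

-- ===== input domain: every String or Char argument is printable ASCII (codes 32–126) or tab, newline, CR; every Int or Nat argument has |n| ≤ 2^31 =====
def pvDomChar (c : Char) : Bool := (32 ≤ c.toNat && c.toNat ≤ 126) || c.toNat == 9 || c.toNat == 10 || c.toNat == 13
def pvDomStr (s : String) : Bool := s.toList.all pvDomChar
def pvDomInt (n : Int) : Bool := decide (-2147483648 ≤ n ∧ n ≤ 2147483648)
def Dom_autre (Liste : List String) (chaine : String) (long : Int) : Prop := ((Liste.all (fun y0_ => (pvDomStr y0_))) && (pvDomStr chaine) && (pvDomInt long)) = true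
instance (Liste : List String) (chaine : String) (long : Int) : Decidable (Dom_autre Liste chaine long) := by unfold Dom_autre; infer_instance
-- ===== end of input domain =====

-- B buckets the sub-anagram words by length in one pass with precomputed per-line counters and emits
-- buckets for k = long..1, replacing A's per-length rescans of the list (objective: faster).


-- ===== PORT A =====
-- Python's `long == 0` base case is written as `long ≤ 0` only to make the recursion well-founded:
-- for long < 0 the Python diverges (RecursionError), and those inputs are outside Pre_autre.
-- Python's inner `for letter in line: … break` computes exactly the `all` below; `ok` is inlined.
def autre (Liste : List String) (chaine : String) (long : Int) : List String :=
  if long ≤ 0 then []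
  else
    (Liste.foldl (fun result line =>
      if (if (PySem.Str.len line : Int) = long then
            line.toList.all (fun letter =>
              !(decide ((PySem.Str.count line (String.mk [letter]) : Int) >
                        (PySem.Str.count chaine (String.mk [letter]) : Int))))
          else false)
      then result ++ [line] else result) [])
    ++ autre Liste chaine (long - 1)
termination_by long.toNat
decreasing_by omega

-- ===== PORT B =====
def autre_alt (Liste : List String) (chaine : String) (long : Int) : List String :=
  let cnt : PySem.Dict Char Int :=
    chaine.toList.foldl (fun d c => d.insert c (d.getD c 0 + 1)) PySem.Dict.empty
  let buckets : PySem.Dict Int (List String) :=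
    Liste.foldl (fun b line =>
      let lc : PySem.Dict Char Int :=
        line.toList.foldl (fun d c => d.insert c (d.getD c 0 + 1)) PySem.Dict.empty
      if lc.items.all (fun p => p.2 ≤ cnt.getD p.1 0) then
        b.modify ((PySem.Str.len line : Int)) [] (· ++ [line])
      else b) PySem.Dict.empty
  (PySem.List.pyRange long 0 (-1)).foldl (fun out k => out ++ buckets.getD k []) []

-- ===== PRECONDITION & SPEC =====
-- Pre_ excludes long < 0, where the Python A recurses past its base case and raises RecursionError.
def Pre_autre (Liste : List String) (chaine : String) (long : Int) : Prop := 0 ≤ long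
instance (Liste : List String) (chaine : String) (long : Int) : Decidable (Pre_autre Liste chaine long) := by unfold Pre_autre; infer_instance
def pvWitness_autre : List String × String × Int := (["ab", "b", "zz", "a"], "bca", 2)

def Spec_autre (Liste : List String) (chaine : String) (long : Int) (out : List String) : Prop := out = autre_alt Liste chaine long
instance (Liste : List String) (chaine : String) (long : Int) (out : List String) : Decidable (Spec_autre Liste chaine long out) := by unfold Spec_autre; infer_instance

-- ===== CLAIM (what is proved, stated in full; the proofs are below) =====
def Claim_equal_autre : Prop := ∀ (Liste : List String) (chaine : String) (long : Int), Dom_autre Liste chaine long → Pre_autre Liste chaine long → Spec_autre Liste chaine long (autre Liste chaine long)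

-- ===== LEMMAS AND PROOFS =====

-- the canonical "line is a sub-anagram of chaine" test both ports compute
def good (chaine line : String) : Bool :=
  line.toList.all (fun c => decide (line.toList.count c ≤ chaine.toList.count c))

theorem count_go_singleton (c : Char) (fuel : Nat) (l : List Char) (acc : Nat)
    (h : l.length ≤ fuel) : PySem.Chars.count.go [c] fuel l acc = acc + l.count c := by
  induction fuel generalizing l acc with
  | zero =>
    have : l = [] := List.eq_nil_of_length_eq_zero (Nat.le_zero.mp h)
    subst this; simp [PySem.Chars.count.go]
  | succ n ih =>
    cases l with
    | nil => simp [PySem.Chars.count.go]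
    | cons hd t =>
      simp only [PySem.Chars.count.go]
      by_cases hc : c = hd
      · subst hc
        simp [List.isPrefixOf, ih _ _ (by simpa using Nat.lt_succ_iff.mp (by simpa using h))]
        omega
      · simp [List.isPrefixOf, hc, ih _ _ (by simpa using Nat.lt_succ_iff.mp (by simpa using h)), Ne.symm hc]

theorem count_singleton (s : String) (c : Char) :
    PySem.Str.count s (String.mk [c]) = s.toList.count c := by
  simp only [PySem.Str.count_eq]
  show PySem.Chars.count s.toList (String.mk [c]).toList = _
  have : (String.mk [c]).toList = [c] := Eq.symm ((fun {l} {s} => String.ofList_eq.mp) rfl)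
  rw [this, PySem.Chars.count]
  simp [count_go_singleton]

-- A's inner per-letter loop computes `good`
theorem A_inner_eq (chaine line : String) :
    (line.toList.all (fun letter =>
      !(decide ((PySem.Str.count line (String.mk [letter]) : Int) >
                (PySem.Str.count chaine (String.mk [letter]) : Int)))))
    = good chaine line := by
  refine List.all_congr rfl (fun a => ?_)
  rw [count_singleton, count_singleton]
  simp [← decide_not]

-- B's per-line counter check computes `good`
theorem B_inner_eq (chaine line : String) :
    ((line.toList.foldl (fun d c => d.insert c (d.getD c 0 + 1)) (PySem.Dict.empty : PySem.Dict Char Int)).items.all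
      (fun p => p.2 ≤ ((chaine.toList.foldl (fun d c => d.insert c (d.getD c 0 + 1)) (PySem.Dict.empty : PySem.Dict Char Int)).getD p.1 0)))
    = good chaine line := by
  simp only [PySem.Dict.foldl_insert_getD_add_one_eq_counter, PySem.Dict.items_counter, List.all_map]
  simp only [PySem.Dict.getD_counter, good]
  rcases h : line.toList.all (fun c => decide (line.toList.count c ≤ chaine.toList.count c)) with _|_
  · simp only [List.all_eq_false] at *
    obtain ⟨c, hc, hp⟩ := h
    refine ⟨c, (PySem.Set.mem_ofList _ _).mpr hc, ?_⟩
    simp at hp ⊢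
    exact_mod_cast hp
  · simp only [List.all_eq_true] at *
    intro c hc
    have := h c ((PySem.Set.mem_ofList _ _).mp hc)
    simp at this ⊢; exact_mod_cast this

-- B's bucket dictionary: bucket k holds exactly the good lines of length k, in list order
theorem bucket_getD (Liste : List String) (chaine : String) (k : Int) :
    ((Liste.foldl (fun b line =>
        if (line.toList.foldl (fun d c => d.insert c (d.getD c 0 + 1)) (PySem.Dict.empty : PySem.Dict Char Int)).items.all
             (fun p => p.2 ≤ ((chaine.toList.foldl (fun d c => d.insert c (d.getD c 0 + 1)) (PySem.Dict.empty : PySem.Dict Char Int)).getD p.1 0)) then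
          b.modify ((PySem.Str.len line : Int)) [] (· ++ [line])
        else b) (PySem.Dict.empty : PySem.Dict Int (List String))).getD k [])
    = Liste.filter (fun line => ((PySem.Str.len line : Int) == k) && good chaine line) := by
  have hstep : (fun (b : PySem.Dict Int (List String)) (line : String) =>
      if (line.toList.foldl (fun d c => d.insert c (d.getD c 0 + 1)) (PySem.Dict.empty : PySem.Dict Char Int)).items.all
           (fun p => p.2 ≤ ((chaine.toList.foldl (fun d c => d.insert c (d.getD c 0 + 1)) (PySem.Dict.empty : PySem.Dict Char Int)).getD p.1 0)) then
        b.modify ((PySem.Str.len line : Int)) [] (· ++ [line])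
      else b)
      = (fun b line => if good chaine line then b.modify ((PySem.Str.len line : Int)) [] (· ++ [line]) else b) := by
    funext b line; rw [B_inner_eq]
  rw [hstep, ← List.foldl_filter,
      ← List.foldl_map (f := fun s => ((PySem.Str.len s : Int), s))
          (g := fun (b : PySem.Dict Int (List String)) (p : Int × String) => b.modify p.1 [] (· ++ [p.2])),
      PySem.Dict.getD_foldl_modify_append, PySem.Dict.getD_empty, List.filter_map, List.map_map,
      List.nil_append]
  have : ((fun (x : Int × String) => x.2) ∘ (fun s => ((PySem.Str.len s : Int), s))) = id := rfl
  rw [this, List.map_id]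
  rw [List.filter_filter]
  rfl

-- A unrolled: the recursion concatenates, for k = long..1, the lines of length k that fit in chaine
theorem A_unroll (Liste : List String) (chaine : String) :
    ∀ (n : Nat) (long : Int), long.toNat = n →
      autre Liste chaine long
        = (PySem.List.pyRange long 0 (-1)).flatMap
            (fun k => Liste.filter (fun line =>
               if (PySem.Str.len line : Int) = k then
                 line.toList.all (fun letter =>
                   !(decide ((PySem.Str.count line (String.mk [letter]) : Int) >
                             (PySem.Str.count chaine (String.mk [letter]) : Int))))
               else false)) := by
  intro n
  induction n using Nat.strong_induction_on with
  | _ n ih =>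
    intro long hn
    rw [autre]
    by_cases h : long ≤ 0
    · rw [if_pos h, PySem.List.pyRange_neg_one_eq_nil h, List.flatMap_nil]
    · rw [if_neg h, PySem.List.pyRange_neg_one_cons (by omega), List.flatMap_cons,
          PySem.List.foldl_append_if_eq_filter, List.nil_append]
      congr 1
      exact ih (long - 1).toNat (by omega) (long - 1) rfl

-- ===== VERDICT (by name: the statement is the Claim_ definition above) =====
theorem autre_spec : Claim_equal_autre := by
  intro Liste chaine long _ _
  unfold Spec_autre autre_alt
  rw [PySem.List.foldl_append_eq_flatMap, List.nil_append, A_unroll Liste chaine long.toNat long rfl]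
  refine List.flatMap_congr ?_
  intro k _
  rw [bucket_getD]
  refine List.filter_congr (fun line _ => ?_)
  rw [A_inner_eq, beq_eq_decide]
  by_cases h : (PySem.Str.len line : Int) = k
  · rw [if_pos h, decide_eq_true h, Bool.true_and]
  · rw [if_neg h, decide_eq_false h, Bool.false_and]
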